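-- pv_equiv track=rewrite | github.com/bsi-liberia/liberia-projects | projectdashboard/query/admin.py | validate_fiscalyears_input
-- ===== SOURCE A (Python) =====
-- START_QUARTERS = ['01-01', '04-01', '07-01', '10-01']
--
-- END_QUARTERS = ['03-31', '06-30', '09-30', '12-31']
--
-- def validate_fiscalyears_input(fiscal_years):
--     for i, item in enumerate(fiscal_years):
--         # Check from is before to
--         if item['start_date'] > item['end_date']: return False
--         if i == 0: continue
--         # Check from is after the previous item's to
--         if item['start_date'] < fiscal_years[i-1]['end_date']: return False
--         # Check start and end dates align with calendar quarters
--         if item['start_date'][5:10] not in START_QUARTERS: return False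
--         if item['end_date'][5:10] not in END_QUARTERS: return False
--     return True
-- ===== SOURCE B (Python) =====
-- START_QUARTERS = ['01-01', '04-01', '07-01', '10-01']
--
-- END_QUARTERS = ['03-31', '06-30', '09-30', '12-31']
--
--
-- def validate_fiscalyears_input(fiscal_years):
--     # Head is only required to be a non-empty interval; the chained conditions
--     # start from the second item, each judged against its predecessor.
--     if not fiscal_years:
--         return True
--     head = fiscal_years[0]
--     if head['start_date'] > head['end_date']:
--         return False
--     return _chain_ok(head, fiscal_years[1:])
--
--
-- def _chain_ok(prev, rest):
--     # A well-formed chain: the first item of `rest` is a non-empty interval,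
--     # starts no earlier than `prev` ends, is quarter-aligned, and the rest of
--     # the chain is well-formed relative to it.
--     if not rest:
--         return True
--     item = rest[0]
--     return (item['start_date'] <= item['end_date']
--             and prev['end_date'] <= item['start_date']
--             and item['start_date'][5:10] in START_QUARTERS
--             and item['end_date'][5:10] in END_QUARTERS
--             and _chain_ok(item, rest[1:]))
-- ===== Notes on version B (the rewrite author's own statement) =====
-- stated objective: alternative
-- what changed: Replaces A's indexed loop (enumerate, an i==0 continue, fiscal_years[i-1] index arithmetic, five early returns) by a structural recursion carrying the previous item as an accumulator, with the head's start<=end check split off and each subsequent item judged by a single and-chain.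
import Mathlib
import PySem

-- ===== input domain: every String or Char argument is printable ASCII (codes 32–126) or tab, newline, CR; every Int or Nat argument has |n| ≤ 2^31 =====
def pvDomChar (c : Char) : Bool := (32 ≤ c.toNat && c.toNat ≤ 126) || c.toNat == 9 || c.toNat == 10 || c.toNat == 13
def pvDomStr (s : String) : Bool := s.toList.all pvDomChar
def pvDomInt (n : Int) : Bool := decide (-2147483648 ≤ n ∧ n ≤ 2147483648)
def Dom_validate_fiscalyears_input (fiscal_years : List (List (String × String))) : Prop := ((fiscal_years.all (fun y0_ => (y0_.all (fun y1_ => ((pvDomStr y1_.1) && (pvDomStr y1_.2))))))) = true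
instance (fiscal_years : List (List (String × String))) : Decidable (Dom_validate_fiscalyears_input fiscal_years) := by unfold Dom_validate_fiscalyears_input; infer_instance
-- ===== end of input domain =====

-- B replaces A's indexed loop (enumerate, i==0 continue, fiscal_years[i-1]) by a structural
-- recursion on the list carrying the previous item, with each item judged by one and-chain
-- (alternative decomposition, same cost).

-- ===== PORT A =====
def START_QUARTERS : List String := ["01-01", "04-01", "07-01", "10-01"]

def END_QUARTERS : List String := ["03-31", "06-30", "09-30", "12-31"]

-- item['k'] (Python dict built from the assoc list; total via getD "", Pre_ guarantees the key exists wherever it is read)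
def pvGetA (item : List (String × String)) (k : String) : String :=
  ((PySem.Dict.ofList item).get? k).getD ""

-- the loop body of A over 'enumerate(fiscal_years)', keeping the index and the
-- fiscal_years[i-1] access of the source
def pvGoA (fys : List (List (String × String))) :
    List (Int × List (String × String)) → Bool
  | [] => true
  | p :: rest =>
    if pvGetA p.2 "end_date" < pvGetA p.2 "start_date" then false
    else if p.1 == 0 then pvGoA fys rest
    else if pvGetA p.2 "start_date" < pvGetA (PySem.List.pyGetD fys (p.1 - 1) []) "end_date" then false
    else if !(START_QUARTERS.contains (PySem.Str.slice (pvGetA p.2 "start_date") (some 5) (some 10))) then false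
    else if !(END_QUARTERS.contains (PySem.Str.slice (pvGetA p.2 "end_date") (some 5) (some 10))) then false
    else pvGoA fys rest

def validate_fiscalyears_input (fiscal_years : List (List (String × String))) : Bool :=
  pvGoA fiscal_years (PySem.List.enumerate fiscal_years 0)

-- ===== PORT B =====
def pvGetB (item : List (String × String)) (k : String) : String :=
  ((PySem.Dict.ofList item).get? k).getD ""

-- Source B's _chain_ok(prev, rest): recursion on the rest of the list, prev carried along
def pvChainOk (prev : List (String × String)) :
    List (List (String × String)) → Bool
  | [] => true
  | item :: rest =>
    decide (pvGetB item "start_date" ≤ pvGetB item "end_date")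
    && decide (pvGetB prev "end_date" ≤ pvGetB item "start_date")
    && START_QUARTERS.contains (PySem.Str.slice (pvGetB item "start_date") (some 5) (some 10))
    && END_QUARTERS.contains (PySem.Str.slice (pvGetB item "end_date") (some 5) (some 10))
    && pvChainOk item rest

def validate_fiscalyears_input_alt (fiscal_years : List (List (String × String))) : Bool :=
  match fiscal_years with
  | [] => true
  | head :: tail =>
    if pvGetB head "end_date" < pvGetB head "start_date" then false
    else pvChainOk head tail

-- ===== PRECONDITION & SPEC =====
def pvKeysOK (item : List (String × String)) : Prop :=
  "start_date" ∈ item.map Prod.fst ∧ "end_date" ∈ item.map Prod.fst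

def pvPreGet (item : List (String × String)) (k : String) : String :=
  ((PySem.Dict.ofList item).get? k).getD ""

-- one of A's per-item checks fails at index i (so A returns False no later than i)
def pvFailAt (fys : List (List (String × String))) (i : Nat) : Prop :=
  pvPreGet (fys.getD i []) "end_date" < pvPreGet (fys.getD i []) "start_date" ∨
  (1 ≤ i ∧
    (pvPreGet (fys.getD i []) "start_date" < pvPreGet (fys.getD (i - 1) []) "end_date" ∨
     ¬ START_QUARTERS.contains (PySem.Str.slice (pvPreGet (fys.getD i []) "start_date") (some 5) (some 10)) ∨
     ¬ END_QUARTERS.contains (PySem.Str.slice (pvPreGet (fys.getD i []) "end_date") (some 5) (some 10))))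

-- Pre_ excludes exactly the inputs on which A raises KeyError (an item without both date keys
-- reached before any failing check); it admits every input A returns on: either all items carry
-- both keys, or some check fails at an index whose items (up to it) all carry both keys.
def Pre_validate_fiscalyears_input (fiscal_years : List (List (String × String))) : Prop :=
  (∀ item ∈ fiscal_years, pvKeysOK item) ∨
  (∃ i < fiscal_years.length, (∀ j ≤ i, pvKeysOK (fiscal_years.getD j [])) ∧ pvFailAt fiscal_years i)
instance (fiscal_years : List (List (String × String))) : Decidable (Pre_validate_fiscalyears_input fiscal_years) := by
  unfold Pre_validate_fiscalyears_input pvKeysOK pvFailAt; infer_instance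

def pvWitness_validate_fiscalyears_input : (List (List (String × String))) :=
  [[("start_date", "2020-01-01"), ("end_date", "2020-03-31")],
   [("start_date", "2020-04-01"), ("end_date", "2020-06-30")]]

def Spec_validate_fiscalyears_input (fiscal_years : List (List (String × String))) (out : Bool) : Prop := out = validate_fiscalyears_input_alt fiscal_years
instance (fiscal_years : List (List (String × String))) (out : Bool) : Decidable (Spec_validate_fiscalyears_input fiscal_years out) := by unfold Spec_validate_fiscalyears_input; infer_instance

-- ===== CLAIM (what is proved, stated in full; the proofs are below) =====
def Claim_equal_validate_fiscalyears_input : Prop := ∀ (fiscal_years : List (List (String × String))), Dom_validate_fiscalyears_input fiscal_years → Pre_validate_fiscalyears_input fiscal_years → Spec_validate_fiscalyears_input fiscal_years (validate_fiscalyears_input fiscal_years)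

-- ===== LEMMAS AND PROOFS =====

theorem pvGetB_eq_pvGetA : pvGetB = pvGetA := rfl

theorem pvIfLe (a b : String) (r : Bool) :
    (if b < a then false else r) = (decide (a ≤ b) && r) := by
  by_cases h : b < a
  · rw [if_pos h]; simp [not_le.mpr h]
  · rw [if_neg h]; simp [not_lt.mp h]

theorem pvIfBang (c : Bool) (r : Bool) :
    (if (!c) = true then false else r) = (c && r) := by
  cases c <;> simp

-- A's loop from index k ≥ 1 onward is exactly Source B's _chain_ok with prev = fys[k-1]
theorem pvGoA_eq_chain (fys : List (List (String × String))) (xs : List (List (String × String)))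
    (k : Nat) (hk : 1 ≤ k) (hdrop : fys.drop k = xs) :
    pvGoA fys (PySem.List.enumerate xs (k : Int)) = pvChainOk (fys.getD (k - 1) []) xs := by
  induction xs generalizing k with
  | nil => simp [PySem.List.enumerate, pvGoA, pvChainOk]
  | cons x xs' ih =>
    have hklen : k < fys.length := by
      by_contra h
      simp [List.drop_eq_nil_of_le (Nat.le_of_not_lt h)] at hdrop
    have hx : fys.getD k [] = x := by
      have h0 : fys[k]'hklen = x := by
        have := List.getElem_drop (xs := fys) (i := k) (j := 0) (h := by simp [hdrop])
        simpa [hdrop] using this.symm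
      simp [List.getD, List.getElem?_eq_getElem hklen, h0]
    have hdrop' : fys.drop (k + 1) = xs' := by
      rw [← List.drop_drop]; simp [hdrop]
    have hprev : PySem.List.pyGetD fys ((k : Int) - 1) [] = fys.getD (k - 1) [] := by
      have h1 : ((k : Int) - 1) = ((k - 1 : Nat) : Int) := by omega
      rw [h1, PySem.List.pyGetD_natCast]
    rw [PySem.List.enumerate_cons]
    simp only [pvGoA, hprev]
    have hknz : ¬ (((k : Int) == 0) = true) := by simp; omega
    have hcast : (k : Int) + 1 = ((k + 1 : Nat) : Int) := by omega
    rw [hcast, ih (k + 1) (by omega) hdrop']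
    simp only [Nat.add_sub_cancel, hx, pvChainOk, pvGetB_eq_pvGetA]
    rw [if_neg hknz, pvIfLe, pvIfLe, pvIfBang, pvIfBang]
    simp [Bool.and_assoc]

theorem pv_main (fys : List (List (String × String))) :
    validate_fiscalyears_input fys = validate_fiscalyears_input_alt fys := by
  cases fys with
  | nil => rfl
  | cons x xs =>
    unfold validate_fiscalyears_input validate_fiscalyears_input_alt
    rw [show ((0:Int)) = ((0:Nat):Int) from rfl, PySem.List.enumerate_cons]
    simp only [pvGoA]
    rw [show ((0:Nat):Int) + 1 = ((1:Nat):Int) from rfl]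
    have hA := pvGoA_eq_chain (x :: xs) xs 1 (le_refl 1) (by simp)
    rw [show (x :: xs).getD (1 - 1) [] = x from rfl] at hA
    rw [hA, pvGetB_eq_pvGetA]
    simp

-- ===== VERDICT (by name: the statement is the Claim_ definition above) =====
theorem validate_fiscalyears_input_spec : Claim_equal_validate_fiscalyears_input := by
  intro fys _ _
  unfold Spec_validate_fiscalyears_input
  exact pv_main fys
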